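-- pv_equiv track=rewrite | github.com/dansierrasam79/PythonBasic | 150finddistinctpairInts.py | retoddPair
-- ===== SOURCE A (Python) =====
-- def retoddPair(myList):
--     finalList = []
--     for i in range(0,len(myList)):
--         for j in range(0, len(myList)):
--             if i != j:
--                 product = myList[i]*myList[j]
--                 if product % 2 != 0:
--                     tupleValues = (myList[i],myList[j])
--                     finalList.append(tupleValues)
--     return finalList
-- ===== SOURCE B (Python) =====
-- def retoddPair(myList):
--     odds = [x for x in myList if x % 2 != 0]
--     finalList = []
--     for i, a in enumerate(odds):
--         finalList += [(a, b) for b in odds[:i] + odds[i+1:]]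
--     return finalList
-- ===== Notes on version B (the rewrite author's own statement) =====
-- stated objective: faster
-- what changed: B filters the odd elements once and runs the quadratic pair loop only over that filtered list (skipping equal positions via slices), instead of A's nested scan over all index pairs of the full list with a parity test on each product.
import Mathlib
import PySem

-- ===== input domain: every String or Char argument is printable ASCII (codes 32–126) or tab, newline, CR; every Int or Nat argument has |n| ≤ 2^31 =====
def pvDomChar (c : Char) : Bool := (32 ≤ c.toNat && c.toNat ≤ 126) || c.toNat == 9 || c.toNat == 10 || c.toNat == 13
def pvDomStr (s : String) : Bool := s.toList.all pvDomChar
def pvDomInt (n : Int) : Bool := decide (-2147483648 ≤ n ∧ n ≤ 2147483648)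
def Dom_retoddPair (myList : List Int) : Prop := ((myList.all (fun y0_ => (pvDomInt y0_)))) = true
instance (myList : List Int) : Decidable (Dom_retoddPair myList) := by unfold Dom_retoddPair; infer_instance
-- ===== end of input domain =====

-- B pre-filters the odd elements once and nests only over them; the return value is proved identical.

-- ===== PORT A =====
def retoddPair (myList : List Int) : List (Int × Int) :=
  (PySem.List.pyRange 0 (myList.length : Int)).foldl (fun finalList i =>
    (PySem.List.pyRange 0 (myList.length : Int)).foldl (fun acc j =>
      if i ≠ j then
        if PySem.Int.mod (PySem.List.pyGetD myList i 0 * PySem.List.pyGetD myList j 0) 2 ≠ 0 then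
          acc ++ [(PySem.List.pyGetD myList i 0, PySem.List.pyGetD myList j 0)]
        else acc
      else acc) finalList) []

-- ===== PORT B =====
def retoddPair_alt (myList : List Int) : List (Int × Int) :=
  let odds := myList.filter (fun x => PySem.Int.mod x 2 != 0)
  (PySem.List.enumerate odds).foldl (fun finalList p =>
    finalList ++ (PySem.List.slice odds none (some p.1) ++ PySem.List.slice odds (some (p.1 + 1)) none).map
      (fun b => (p.2, b))) []

-- ===== PRECONDITION & SPEC =====
def Spec_retoddPair (myList : List Int) (out : List (Int × Int)) : Prop := out = retoddPair_alt myList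
instance (myList : List Int) (out : List (Int × Int)) : Decidable (Spec_retoddPair myList out) := by unfold Spec_retoddPair; infer_instance

-- ===== CLAIM (what is proved, stated in full; the proofs are below) =====
def Claim_equal_retoddPair : Prop := ∀ (myList : List Int), Dom_retoddPair myList → Spec_retoddPair myList (retoddPair myList)

-- ===== LEMMAS AND PROOFS =====

/-- "is odd" test as both Pythons write it. -/
def pvP (x : Int) : Bool := PySem.Int.mod x 2 != 0

theorem pvOddMul (x y : Int) :
    (PySem.Int.mod (x * y) 2 ≠ 0) ↔ (pvP x = true ∧ pvP y = true) := by
  have h2 : (2:Int) ∣ x * y ↔ 2 ∣ x ∨ 2 ∣ y := Int.prime_two.dvd_mul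
  simp only [pvP, bne_iff_ne, Ne, PySem.Int.mod_eq_zero_iff_dvd, h2]
  tauto

theorem pvFilt (P : Int → Bool) (l : List Int) :
    (List.range l.length).flatMap (fun j => if P (l.getD j 0) then [l.getD j 0] else []) = l.filter P := by
  induction l with
  | nil => simp
  | cons a t ih =>
    rw [List.length_cons, List.range_succ_eq_map, List.flatMap_cons, List.flatMap_map]
    have h2 : (List.range t.length).flatMap
        (fun j => if P ((a :: t).getD (Nat.succ j) 0) then [(a :: t).getD (Nat.succ j) 0] else [])
        = t.filter P := by
      simpa [List.getD_cons_succ] using ih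
    rw [h2]
    by_cases h : P a <;> simp [h]

theorem pvInner (P : Int → Bool) (l : List Int) (i : Nat) :
    (List.range l.length).flatMap (fun j => if i ≠ j ∧ P (l.getD j 0) then [l.getD j 0] else [])
      = (l.eraseIdx i).filter P := by
  induction l generalizing i with
  | nil => simp
  | cons a t ih =>
    rw [List.length_cons, List.range_succ_eq_map, List.flatMap_cons, List.flatMap_map]
    cases i with
    | zero =>
      simp only [ne_eq, not_true_eq_false, false_and, if_false, List.nil_append, List.eraseIdx_cons_zero]
      simpa [List.getD_cons_succ, Nat.succ_ne_zero] using pvFilt P t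
    | succ k =>
      have hrest : (List.range t.length).flatMap
          (fun j => if Nat.succ k ≠ Nat.succ j ∧ P (t.getD j 0) then [t.getD j 0] else [])
          = (t.eraseIdx k).filter P := by
        simpa using ih k
      by_cases h : P a <;>
        simp_all [List.eraseIdx_cons_succ]

theorem pvOuter (P : Int → Bool) (l : List Int) (f : Int → List Int → List (Int × Int)) :
    (List.range l.length).flatMap
        (fun i => if P (l.getD i 0) then f (l.getD i 0) ((l.eraseIdx i).filter P) else [])
      = (l.filter P).zipIdx.flatMap (fun p => f p.1 ((l.filter P).eraseIdx p.2)) := by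
  induction l generalizing f with
  | nil => simp
  | cons a t ih =>
    rw [List.length_cons, List.range_succ_eq_map, List.flatMap_cons, List.flatMap_map]
    simp only [List.getD_cons_zero, List.getD_cons_succ, List.eraseIdx_cons_zero,
      List.eraseIdx_cons_succ, Nat.succ_eq_add_one]
    by_cases h : P a
    · have hrest : (List.range t.length).flatMap
          (fun i => if P (t.getD i 0) = true then f (t.getD i 0) (a :: (t.eraseIdx i).filter P) else [])
          = (t.filter P).zipIdx.flatMap (fun p => f p.1 (a :: (t.filter P).eraseIdx p.2)) :=
        ih (fun x ys => f x (a :: ys))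
      simp only [List.filter_cons_of_pos h, if_pos h, List.zipIdx_cons, List.flatMap_cons,
        List.eraseIdx_cons_zero]
      rw [List.zipIdx_succ, List.flatMap_map, hrest]
      congr 1
    · have hrest : (List.range t.length).flatMap
          (fun i => if P (t.getD i 0) = true then f (t.getD i 0) ((t.eraseIdx i).filter P) else [])
          = (t.filter P).zipIdx.flatMap (fun p => f p.1 ((t.filter P).eraseIdx p.2)) := ih f
      simp only [List.filter_cons_of_neg h, if_neg h, List.nil_append]
      exact hrest

theorem pvA_eq (l : List Int) : retoddPair l =
    (List.range l.length).flatMap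
      (fun i => if pvP (l.getD i 0) then ((l.eraseIdx i).filter pvP).map (fun y => (l.getD i 0, y)) else []) := by
  unfold retoddPair
  rw [PySem.List.pyRange_zero_natCast]
  have hin : ∀ (i : Int) (rs : List Int) (acc : List (Int × Int)),
      rs.foldl (fun acc j =>
        if i ≠ j then
          if PySem.Int.mod (PySem.List.pyGetD l i 0 * PySem.List.pyGetD l j 0) 2 ≠ 0 then
            acc ++ [(PySem.List.pyGetD l i 0, PySem.List.pyGetD l j 0)]
          else acc
        else acc) acc
      = acc ++ rs.flatMap (fun j =>
          if i ≠ j ∧ PySem.Int.mod (PySem.List.pyGetD l i 0 * PySem.List.pyGetD l j 0) 2 ≠ 0 then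
            [(PySem.List.pyGetD l i 0, PySem.List.pyGetD l j 0)] else []) := by
    intro i rs
    induction rs with
    | nil => intro acc; simp
    | cons r rs ih =>
      intro acc
      rw [List.foldl_cons, List.flatMap_cons]
      by_cases h1 : i ≠ r
      · by_cases h2 : PySem.Int.mod (PySem.List.pyGetD l i 0 * PySem.List.pyGetD l r 0) 2 ≠ 0
        · rw [if_pos h1, if_pos h2, ih, if_pos ⟨h1, h2⟩, List.append_assoc]
        · rw [if_pos h1, if_neg h2, ih, if_neg (fun hc => h2 hc.2), List.nil_append]
      · rw [if_neg h1, ih, if_neg (fun hc => h1 hc.1), List.nil_append]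
  simp only [hin]
  rw [PySem.List.foldl_append_eq_flatMap, List.nil_append, List.flatMap_map]
  congr 1
  funext i
  rw [List.flatMap_map]
  have hget : PySem.List.pyGetD l (i : Int) 0 = l.getD i 0 := PySem.List.pyGetD_natCast l i 0
  by_cases hx : pvP (l.getD i 0) = true
  · have hcond : ∀ j : Nat,
        (((i : Nat) : Int) ≠ ((j : Nat) : Int) ∧
          PySem.Int.mod (PySem.List.pyGetD l (i : Int) 0 * PySem.List.pyGetD l (j : Int) 0) 2 ≠ 0)
        ↔ (i ≠ j ∧ pvP (l.getD j 0) = true) := by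
      intro j
      rw [hget, PySem.List.pyGetD_natCast l j 0]
      constructor
      · rintro ⟨h1, h2⟩
        exact ⟨fun e => h1 (by exact_mod_cast e), ((pvOddMul _ _).mp h2).2⟩
      · rintro ⟨h1, h3⟩
        exact ⟨fun e => h1 (by exact_mod_cast e), (pvOddMul _ _).mpr ⟨hx, h3⟩⟩
    have hbody : (fun j : Nat =>
        if ((i : Nat) : Int) ≠ ((j : Nat) : Int) ∧
            PySem.Int.mod (PySem.List.pyGetD l (i : Int) 0 * PySem.List.pyGetD l (j : Int) 0) 2 ≠ 0 then
          [(PySem.List.pyGetD l (i : Int) 0, PySem.List.pyGetD l (j : Int) 0)] else [])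
        = (fun j : Nat => (if i ≠ j ∧ pvP (l.getD j 0) = true then [l.getD j 0] else []).map
            (fun y => (l.getD i 0, y))) := by
      funext j
      by_cases hc : i ≠ j ∧ pvP (l.getD j 0) = true
      · rw [if_pos ((hcond j).mpr hc), if_pos hc, hget, PySem.List.pyGetD_natCast l j 0]
        rfl
      · rw [if_neg (fun h => hc ((hcond j).mp h)), if_neg hc]
        rfl
    rw [hbody, ← List.map_flatMap, pvInner pvP l i, if_pos hx]
  · rw [if_neg hx]
    refine List.flatMap_eq_nil_iff.mpr ?_
    intro j hj
    have hc : ¬(((i : Nat) : Int) ≠ ((j : Nat) : Int) ∧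
        PySem.Int.mod (PySem.List.pyGetD l (i : Int) 0 * PySem.List.pyGetD l (j : Int) 0) 2 ≠ 0) := by
      rintro ⟨-, h2⟩
      have h3 := ((pvOddMul _ _).mp h2).1
      rw [hget] at h3
      exact hx h3
    exact if_neg hc

theorem pvB_eq (l : List Int) : retoddPair_alt l =
    (l.filter pvP).zipIdx.flatMap
      (fun p => ((l.filter pvP).eraseIdx p.2).map (fun y => (p.1, y))) := by
  simp only [retoddPair_alt]
  rw [PySem.List.foldl_append_eq_flatMap, List.nil_append, PySem.List.enumerate_eq_zipIdx_map,
    List.flatMap_map]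
  congr 1
  funext p
  simp only [zero_add]
  rw [PySem.List.slice_to_natCast,
    show ((p.2 : Int) + 1) = ((p.2 + 1 : Nat) : Int) by push_cast; ring,
    PySem.List.slice_from_natCast, ← List.eraseIdx_eq_take_drop_succ]
  rfl

-- ===== VERDICT (by name: the statement is the Claim_ definition above) =====
theorem retoddPair_spec : Claim_equal_retoddPair := by
  intro l _
  unfold Spec_retoddPair
  rw [pvA_eq l, pvB_eq l]
  exact pvOuter pvP l (fun x ys => ys.map (fun y => (x, y)))
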